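-- pv_equiv track=rewrite | github.com/Wlodzimierz-Lewoniewski/zadanie-7-lsi-MikoOws1 | main.py | zbuduj_mtx
-- ===== SOURCE A (Python) =====
-- def zbuduj_mtx(teksty, frazy):
--     unikalne = sorted(set(slowo for tekst in teksty for slowo in tekst.split()))
--     mac = []
--
--     for tekst in teksty:
--         zbior = set(tekst.split())
--         wiersz = [1 if slowo in zbior else 0 for slowo in unikalne]
--         mac.append(wiersz)
--
--     frazy_vec = [1 if slowo in unikalne and slowo in frazy else 0 for slowo in unikalne]
--
--     return mac, frazy_vec
-- ===== SOURCE B (Python) =====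
-- def _wiersz(ws, index, n):
--     w = [0] * n
--     for s in ws:
--         w[index[s]] = 1
--     return w
--
--
-- def zbuduj_mtx(teksty, frazy):
--     slowa = [tekst.split() for tekst in teksty]
--     zb = set()
--     for ws in slowa:
--         zb.update(ws)
--     unikalne = sorted(zb)
--     index = {slowo: i for i, slowo in enumerate(unikalne)}
--     n = len(unikalne)
--     mac = [_wiersz(ws, index, n) for ws in slowa]
--     frazy_vec = _wiersz([w for w in frazy if w in index], index, n)
--     return mac, frazy_vec
-- ===== Notes on version B (the rewrite author's own statement) =====
-- stated objective: alternative
-- what changed: B tokenises every text once, grows the vocabulary set by update in a loop, then builds every row (including the phrase vector) by one shared marking routine that zero-fills a row and sets positions looked up in a word-to-column index dict for the words actually present, instead of A's per-row membership test of every vocabulary word and A's separate phrase-vector comprehension.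
import Mathlib
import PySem

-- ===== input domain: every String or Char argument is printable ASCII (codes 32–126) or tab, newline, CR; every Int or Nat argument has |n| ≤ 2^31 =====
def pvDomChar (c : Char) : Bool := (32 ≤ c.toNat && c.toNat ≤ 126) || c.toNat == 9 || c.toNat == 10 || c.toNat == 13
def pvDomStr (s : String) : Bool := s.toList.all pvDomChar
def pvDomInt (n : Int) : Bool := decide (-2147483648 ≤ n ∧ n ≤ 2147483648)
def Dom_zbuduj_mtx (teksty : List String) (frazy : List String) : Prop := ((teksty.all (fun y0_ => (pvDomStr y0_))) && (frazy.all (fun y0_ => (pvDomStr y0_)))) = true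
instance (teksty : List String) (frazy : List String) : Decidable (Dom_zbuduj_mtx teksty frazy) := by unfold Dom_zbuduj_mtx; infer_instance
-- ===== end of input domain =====

-- B tokenises each text once, grows the vocabulary set by update in a loop, and builds every row —
-- including the phrase vector — by one shared marking routine (zero row + set the columns of the
-- words actually present, via a word→column index); an alternative decomposition, same return value.

-- ===== PORT A =====
def zbuduj_mtx (teksty : List String) (frazy : List String) : List (List Int) × List Int :=
  let unikalne := PySem.List.sorted (PySem.Set.ofList (teksty.flatMap (fun tekst => PySem.Str.split₀ tekst))) (fun x => x) false
  let mac := teksty.foldl (fun mac tekst =>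
      let zbior : PySem.Set String := PySem.Set.ofList (PySem.Str.split₀ tekst)
      let wiersz := unikalne.map (fun slowo => if PySem.Set.contains zbior slowo then (1 : Int) else 0)
      mac ++ [wiersz]) []
  let frazy_vec := unikalne.map (fun slowo => if unikalne.contains slowo && frazy.contains slowo then (1 : Int) else 0)
  (mac, frazy_vec)

-- ===== PORT B =====
-- _wiersz(ws, index, n): zero row of length n, then w[index[s]] = 1 for each s in ws
-- (every s handed to it lies in the vocabulary, so index[s] exists and is in range:
--  getD's default 0 and the total pySetD are exact here — no KeyError/IndexError occurs)
def pvWiersz (index : PySem.Dict String Int) (n : Nat) (ws : List String) : List Int :=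
  ws.foldl (fun w s => PySem.List.pySetD w (index.getD s 0) 1) (List.replicate n (0 : Int))

def zbuduj_mtx_alt (teksty : List String) (frazy : List String) : List (List Int) × List Int :=
  let slowa := teksty.map (fun tekst => PySem.Str.split₀ tekst)
  let zb : PySem.Set String := slowa.foldl (fun zb ws => PySem.Set.update zb ws) PySem.Set.empty
  let unikalne := PySem.List.sorted zb (fun x => x) false
  let index : PySem.Dict String Int :=
    (PySem.List.enumerate unikalne 0).foldl (fun d p => d.insert p.2 p.1) PySem.Dict.empty
  let n := unikalne.length
  let mac := slowa.map (fun ws => pvWiersz index n ws)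
  let frazy_vec := pvWiersz index n (frazy.filter (fun w => index.contains w))
  (mac, frazy_vec)

-- ===== PRECONDITION & SPEC =====
def Spec_zbuduj_mtx (teksty : List String) (frazy : List String) (out : List (List Int) × List Int) : Prop := out = zbuduj_mtx_alt teksty frazy
instance (teksty : List String) (frazy : List String) (out : List (List Int) × List Int) : Decidable (Spec_zbuduj_mtx teksty frazy out) := by unfold Spec_zbuduj_mtx; infer_instance

-- ===== CLAIM (what is proved, stated in full; the proofs are below) =====
def Claim_equal_zbuduj_mtx : Prop := ∀ (teksty : List String) (frazy : List String), Dom_zbuduj_mtx teksty frazy → Spec_zbuduj_mtx teksty frazy (zbuduj_mtx teksty frazy)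

-- ===== LEMMAS AND PROOFS =====

-- the update-loop over the per-text word lists builds set(all words)
theorem update_fold_eq_ofList_flatMap (f : String → List String) :
    ∀ (xs : List String) (init : PySem.Set String),
      (xs.map f).foldl (fun zb ws => PySem.Set.update zb ws) init
        = PySem.Set.update init (xs.flatMap f)
  | [], init => by simp [PySem.Set.update]
  | x :: xs, init => by
    simp only [List.map_cons, List.foldl_cons, List.flatMap_cons]
    rw [update_fold_eq_ofList_flatMap f xs, PySem.Set.update_append]

-- the index dict maps each element of a Nodup list to its position
theorem getD_index_eq (u : List String) (hu : u.Nodup) (k : Nat) (hk : k < u.length) :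
    ((PySem.List.enumerate u 0).foldl (fun d p => d.insert p.2 p.1) PySem.Dict.empty).getD u[k] 0
      = (k : Int) := by
  have hfresh : ∀ p ∈ PySem.List.enumerate u 0, (PySem.Dict.empty : PySem.Dict String Int).contains p.2 = false := by
    intro p _; simp [PySem.Dict.contains_empty]
  have hnd : ((PySem.List.enumerate u 0).map (·.2)).Nodup := by
    rw [PySem.List.map_snd_enumerate]; exact hu
  have hitems := PySem.Dict.items_foldl_insert_fresh (l := PySem.List.enumerate u 0)
      (k := (·.2)) (v := (·.1)) (d := PySem.Dict.empty) hfresh hnd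
  beta_reduce at hitems
  have hmem : (u[k], (k : Int)) ∈ ((PySem.List.enumerate u 0).foldl (fun d p => d.insert p.2 p.1) PySem.Dict.empty).items := by
    rw [hitems]
    simp only [PySem.Dict.empty, List.nil_append, List.mem_map]
    exact ⟨((k : Int), u[k]), by
      rw [PySem.List.mem_enumerate_iff]; exact ⟨k, hk, by simp⟩, rfl⟩
  have hkeys : ((PySem.List.enumerate u 0).foldl (fun d p => d.insert p.2 p.1) PySem.Dict.empty).keys.Nodup := by
    have h2 : ((PySem.List.enumerate u 0).foldl (fun d p => d.insert p.2 p.1) PySem.Dict.empty).keys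
        = ((PySem.List.enumerate u 0).map (·.2)) := by
      simp only [PySem.Dict.keys]
      rw [hitems]
      simp only [PySem.Dict.empty, List.nil_append, List.map_map]
      simp [Function.comp_def]
    rw [h2]; exact hnd
  exact PySem.Dict.getD_of_mem_items _ hmem hkeys 0

-- the index dict's keys are exactly the vocabulary
theorem contains_index_iff (u : List String) (w : String) :
    ((PySem.List.enumerate u 0).foldl (fun d p => d.insert p.2 p.1) PySem.Dict.empty).contains w = true
      ↔ w ∈ u := by
  rw [PySem.Dict.contains_iff_mem_keys]
  have h := PySem.Dict.keys_foldl_insert_key (l := PySem.List.enumerate u 0)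
      (key := (·.2)) (f := fun _ p => p.1) (d := (PySem.Dict.empty : PySem.Dict String Int))
  beta_reduce at h
  rw [h, PySem.List.map_snd_enumerate]
  simp [PySem.Dict.keys_empty, PySem.Set.mem_update]

-- setting position idxOf w of a mapped row to 1
theorem set_map_idxOf (f : String → Int) (w : String) :
    ∀ (u : List String), u.Nodup → w ∈ u →
      (u.map f).set (u.idxOf w) 1 = u.map (fun x => if x = w then 1 else f x)
  | [], _, hw => by cases hw
  | a :: u, hu, hw => by
    by_cases haw : a = w
    · have hnot : w ∉ u := haw ▸ (List.nodup_cons.mp hu).1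
      simp only [haw, List.idxOf_cons_self, List.map_cons, List.set_cons_zero]
      congr 1
      exact (List.map_congr_left (fun x hx => by
        have hxw : ¬ x = w := fun h => hnot (h ▸ hx)
        simp [hxw])).symm
    · have hw' : w ∈ u := by
        cases hw with
        | head => exact absurd rfl haw
        | tail _ h => exact h
      rw [List.idxOf_cons_ne _ haw]
      simp only [List.map_cons, List.set_cons_succ]
      rw [if_neg haw, set_map_idxOf f w u (List.nodup_cons.mp hu).2 hw']

-- marking the positions of ws in a mapped row
theorem mark_eq (u : List String) (hu : u.Nodup) (ws : List String) (hws : ∀ w ∈ ws, w ∈ u) :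
    ∀ f : String → Int,
      ws.foldl (fun r s => r.set (u.idxOf s) 1) (u.map f)
        = u.map (fun x => if x ∈ ws then 1 else f x) := by
  induction ws with
  | nil => intro f; simp
  | cons w ws ih =>
    intro f
    have hw : w ∈ u := hws w (List.mem_cons_self ..)
    simp only [List.foldl_cons]
    rw [set_map_idxOf f w u hu hw,
        ih (fun x hx => hws x (List.mem_cons_of_mem _ hx)) (fun x => if x = w then 1 else f x)]
    refine List.map_congr_left (fun x _ => ?_)
    by_cases h1 : x ∈ ws <;> by_cases h2 : x = w <;> simp [h1, h2]

-- pvWiersz over a word list inside the vocabulary is the indicator row of that list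
theorem pvWiersz_eq_indicator (u : List String) (hu : u.Nodup) (ws : List String)
    (hws : ∀ w ∈ ws, w ∈ u) :
    pvWiersz ((PySem.List.enumerate u 0).foldl (fun d p => d.insert p.2 p.1) PySem.Dict.empty)
        u.length ws
      = u.map (fun x => if x ∈ ws then 1 else 0) := by
  unfold pvWiersz
  have hrepl : (List.replicate u.length (0 : Int)) = u.map (fun _ => (0 : Int)) := by
    simp [List.map_const']
  have hstep : ∀ (r : List Int) (s : String), s ∈ ws →
      PySem.List.pySetD r (((PySem.List.enumerate u 0).foldl (fun d p => d.insert p.2 p.1) PySem.Dict.empty).getD s 0) 1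
        = r.set (u.idxOf s) 1 := by
    intro r s hs
    have hsu : s ∈ u := hws s hs
    have hk : u.idxOf s < u.length := List.idxOf_lt_length_of_mem hsu
    have hgd : ((PySem.List.enumerate u 0).foldl (fun d p => d.insert p.2 p.1) PySem.Dict.empty).getD s 0
        = (u.idxOf s : Int) := by
      have h3 := getD_index_eq u hu (u.idxOf s) hk
      rwa [List.getElem_idxOf] at h3
    rw [hgd, PySem.List.pySetD_natCast]
  rw [PySem.List.foldl_congr_mem _ _ _ _ (fun r s hs => hstep r s hs), hrepl,
      mark_eq u hu ws hws]

-- ===== VERDICT (by name: the statement is the Claim_ definition above) =====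
theorem zbuduj_mtx_spec : Claim_equal_zbuduj_mtx := by
  intro teksty frazy _
  unfold Spec_zbuduj_mtx zbuduj_mtx zbuduj_mtx_alt
  simp only []
  -- B's vocabulary is A's vocabulary
  rw [update_fold_eq_ofList_flatMap, PySem.Set.update_empty]
  set u := PySem.List.sorted (PySem.Set.ofList (teksty.flatMap (fun tekst => PySem.Str.split₀ tekst))) (fun x => x) false with hu_def
  have hu : u.Nodup := by
    have h4 := (PySem.List.sorted_perm (PySem.Set.ofList (teksty.flatMap (fun tekst => PySem.Str.split₀ tekst))) (fun x : String => x) false).symm.nodup (PySem.Set.nodup_ofList _)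
    rw [hu_def]; exact h4
  have hmemu : ∀ tekst ∈ teksty, ∀ w ∈ PySem.Str.split₀ tekst, w ∈ u := by
    intro tekst ht w hw
    rw [hu_def, PySem.List.mem_sorted, PySem.Set.mem_ofList]
    exact List.mem_flatMap.mpr ⟨tekst, ht, hw⟩
  refine Prod.ext ?_ ?_
  · -- matrices
    dsimp only
    rw [PySem.List.foldl_append_singleton_eq_map, List.nil_append, List.map_map]
    refine List.map_congr_left (fun tekst ht => ?_)
    rw [Function.comp_apply,
        pvWiersz_eq_indicator u hu (PySem.Str.split₀ tekst) (hmemu tekst ht)]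
    refine List.map_congr_left (fun x _ => ?_)
    by_cases h : x ∈ PySem.Str.split₀ tekst <;>
      simp [h, PySem.Set.contains, PySem.Set.mem_ofList]
  · -- phrase vectors
    dsimp only
    have hws : ∀ w ∈ frazy.filter (fun w =>
        ((PySem.List.enumerate u 0).foldl (fun d p => d.insert p.2 p.1) PySem.Dict.empty).contains w), w ∈ u := by
      intro w hw
      exact (contains_index_iff u w).mp (List.of_mem_filter hw)
    rw [pvWiersz_eq_indicator u hu _ hws]
    refine List.map_congr_left (fun w hw => ?_)
    have hcw : ((PySem.List.enumerate u 0).foldl (fun d p => d.insert p.2 p.1) PySem.Dict.empty).contains w = true :=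
      (contains_index_iff u w).mpr hw
    simp [List.mem_filter, hcw, hw]
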